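-- pv_equiv track=rewrite | github.com/lxd-cumt/FlagScale | flagscale/backends/Megatron-LM/megatron/core/transformer/magi_attention.py | get_global_k_list
-- ===== SOURCE A (Python) =====
-- def get_global_k(
--     k,
--     seq_len, # total_seq_len / cp_size
--     bsz,
--     pad_size,
--     batch_id,
-- ):
--     cp_rank = k // seq_len
--     offset = k % seq_len
--     global_k = cp_rank * (seq_len*bsz+pad_size) + batch_id * seq_len + offset
--     return global_k
--
-- def split_into_intervals(lst):
--     if not lst:
--         return []
--     result = []
--     current_start = lst[0]
--     current_end = lst[0] + 1
--
--     for i in range(1, len(lst)):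
--         if lst[i] == lst[i-1] + 1:
--             current_end = lst[i] + 1
--         else:
--             result.append([current_start, current_end])
--             current_start = lst[i]
--             current_end = lst[i] + 1
--
--     result.append([current_start, current_end])
--     return result
--
-- def get_global_k_list(
--     k_range_start,
--     k_range_end,
--     seq_len, # total_seq_len / cp_size
--     bsz,
--     pad_size,
--     batch_id,
-- ):
--     k_list = []
--     for k in range(k_range_start, k_range_end):
--         global_k = get_global_k(k, seq_len, bsz, pad_size, batch_id)
--         k_list.append(global_k)
--
--     return split_into_intervals(k_list)
-- ===== SOURCE B (Python) =====
-- def get_global_k_list(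
--     k_range_start,
--     k_range_end,
--     seq_len, # total_seq_len / cp_size
--     bsz,
--     pad_size,
--     batch_id,
-- ):
--     # One interval per seq_len-block, computed from its endpoints (no per-k loop).
--     if k_range_start >= k_range_end:
--         return []
--     stride = seq_len * bsz + pad_size
--     base = batch_id * seq_len
--     if stride == seq_len:
--         # consecutive blocks chain: global_k == k + base everywhere
--         return [[k_range_start + base, k_range_end + base]]
--     c_first = k_range_start // seq_len
--     c_last = (k_range_end - 1) // seq_len
--     result = []
--     for c in range(c_first, c_last + 1):
--         lo = max(k_range_start, c * seq_len)
--         hi = min(k_range_end, (c + 1) * seq_len)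
--         d = c * (stride - seq_len) + base
--         result.append([lo + d, hi + d])
--     return result
-- ===== Notes on version B (the rewrite author's own statement) =====
-- stated objective: faster
-- what changed: Instead of materialising every global_k in the range and scanning it pairwise for consecutive runs, B walks the seq_len-aligned blocks the range overlaps and emits each block's interval in closed form from its endpoints (with a single-interval closed form when consecutive blocks chain, i.e. seq_len*bsz+pad_size == seq_len).
-- outside the precondition, e.g. on get_global_k_list(0, 2, 0, 1, 1, 0): A raises ZeroDivisionError, B raises ZeroDivisionError; on get_global_k_list(-1, 2, -2, 1, 1, 0): A returns [[-1, 1], [0, 1]], B returns []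
import Mathlib
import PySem

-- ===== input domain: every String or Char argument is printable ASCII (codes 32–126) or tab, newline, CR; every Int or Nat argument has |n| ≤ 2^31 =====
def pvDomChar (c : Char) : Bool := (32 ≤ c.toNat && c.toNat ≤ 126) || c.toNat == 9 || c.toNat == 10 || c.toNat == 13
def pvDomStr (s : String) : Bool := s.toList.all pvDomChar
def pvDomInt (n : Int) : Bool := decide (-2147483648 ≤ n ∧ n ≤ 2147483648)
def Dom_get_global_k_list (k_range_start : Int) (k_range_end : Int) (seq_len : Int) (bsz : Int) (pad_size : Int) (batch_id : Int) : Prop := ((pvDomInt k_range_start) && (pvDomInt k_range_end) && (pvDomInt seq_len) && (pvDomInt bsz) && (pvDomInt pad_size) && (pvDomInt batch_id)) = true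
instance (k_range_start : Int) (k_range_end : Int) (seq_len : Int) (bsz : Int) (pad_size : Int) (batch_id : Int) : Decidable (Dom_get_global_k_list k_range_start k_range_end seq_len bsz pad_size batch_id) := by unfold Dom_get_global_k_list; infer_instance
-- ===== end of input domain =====

-- B replaces A's per-k enumeration of the whole range by one closed-form interval per
-- seq_len-aligned block the range overlaps (objective: faster on long ranges).

-- ===== PORT A =====
def get_global_k (k : Int) (seq_len : Int) (bsz : Int) (pad_size : Int) (batch_id : Int) : Int :=
  let cp_rank := PySem.Int.floordiv k seq_len
  let offset := PySem.Int.mod k seq_len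
  cp_rank * (seq_len * bsz + pad_size) + batch_id * seq_len + offset

-- 'for i in range(1, len(lst)):' reads lst[i] and lst[i-1]; ported exactly as a fold over
-- lst.tail with the same state (result, current_start, current_end) extended by the previous
-- element lst[i-1]; 'result.append(..)' is accumulated with cons and reversed once at the
-- end (the same list, built in linear time).
def split_into_intervals (lst : List Int) : List (List Int) :=
  match lst with
  | [] => []
  | x :: t =>
    let st := t.foldl
      (fun (s : (List (List Int) × Int × Int) × Int) (cur : Int) =>
        if cur = s.2 + 1 then ((s.1.1, s.1.2.1, cur + 1), cur)
        else (([s.1.2.1, s.1.2.2] :: s.1.1, cur, cur + 1), cur))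
      (([], x, x + 1), x)
    st.1.1.reverse ++ [[st.1.2.1, st.1.2.2]]

def get_global_k_list (k_range_start : Int) (k_range_end : Int) (seq_len : Int) (bsz : Int) (pad_size : Int) (batch_id : Int) : List (List Int) :=
  -- 'k_list.append(..)' per k: accumulated with cons and reversed once (same list, linear time)
  let k_list := ((PySem.List.pyRange k_range_start k_range_end 1).foldl
    (fun acc k => get_global_k k seq_len bsz pad_size batch_id :: acc) []).reverse
  split_into_intervals k_list

-- ===== PORT B =====
def get_global_k_list_alt (k_range_start : Int) (k_range_end : Int) (seq_len : Int) (bsz : Int) (pad_size : Int) (batch_id : Int) : List (List Int) :=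
  if k_range_end ≤ k_range_start then []
  else
    let stride := seq_len * bsz + pad_size
    let base := batch_id * seq_len
    if stride = seq_len then [[k_range_start + base, k_range_end + base]]
    else
      let c_first := PySem.Int.floordiv k_range_start seq_len
      let c_last := PySem.Int.floordiv (k_range_end - 1) seq_len
      -- 'result.append(..)' per block: accumulated with cons and reversed once (same list, linear time)
      ((PySem.List.pyRange c_first (c_last + 1) 1).foldl
        (fun acc c => [max k_range_start (c * seq_len) + (c * (stride - seq_len) + base),
                       min k_range_end ((c + 1) * seq_len) + (c * (stride - seq_len) + base)] :: acc) []).reverse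

-- ===== PRECONDITION & SPEC =====
-- Pre_ restricts to the natural domain 1 ≤ seq_len (seq_len is total_seq_len / cp_size, a positive
-- length): at seq_len = 0 A raises ZeroDivisionError, and seq_len < 0 is outside the function's
-- natural domain (B does not reproduce A's floor-division layout there).
def Pre_get_global_k_list (k_range_start : Int) (k_range_end : Int) (seq_len : Int) (bsz : Int) (pad_size : Int) (batch_id : Int) : Prop := 1 ≤ seq_len
instance (k_range_start : Int) (k_range_end : Int) (seq_len : Int) (bsz : Int) (pad_size : Int) (batch_id : Int) : Decidable (Pre_get_global_k_list k_range_start k_range_end seq_len bsz pad_size batch_id) := by unfold Pre_get_global_k_list; infer_instance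

def pvWitness_get_global_k_list : Int × Int × Int × Int × Int × Int := (0, 5, 2, 2, 1, 1)

def Spec_get_global_k_list (k_range_start : Int) (k_range_end : Int) (seq_len : Int) (bsz : Int) (pad_size : Int) (batch_id : Int) (out : List (List Int)) : Prop := out = get_global_k_list_alt k_range_start k_range_end seq_len bsz pad_size batch_id
instance (k_range_start : Int) (k_range_end : Int) (seq_len : Int) (bsz : Int) (pad_size : Int) (batch_id : Int) (out : List (List Int)) : Decidable (Spec_get_global_k_list k_range_start k_range_end seq_len bsz pad_size batch_id out) := by unfold Spec_get_global_k_list; infer_instance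

-- ===== CLAIM (what is proved, stated in full; the proofs are below) =====
def Claim_equal_get_global_k_list : Prop := ∀ (k_range_start : Int) (k_range_end : Int) (seq_len : Int) (bsz : Int) (pad_size : Int) (batch_id : Int), Dom_get_global_k_list k_range_start k_range_end seq_len bsz pad_size batch_id → Pre_get_global_k_list k_range_start k_range_end seq_len bsz pad_size batch_id → Spec_get_global_k_list k_range_start k_range_end seq_len bsz pad_size batch_id (get_global_k_list k_range_start k_range_end seq_len bsz pad_size batch_id)

-- ===== LEMMAS AND PROOFS =====

-- Recursive rendering of A's interval-splitting loop: state (res, cur_start, prev element).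
def spGo (res : List (List Int)) (cs prev : Int) : List Int → List (List Int)
  | [] => res ++ [[cs, prev + 1]]
  | y :: t => if y = prev + 1 then spGo res cs y t else spGo (res ++ [[cs, prev + 1]]) y y t

theorem spGo_eq_fold (t : List Int) : ∀ (prev cs : Int) (res : List (List Int)),
    (let st := t.foldl
      (fun (s : (List (List Int) × Int × Int) × Int) (cur : Int) =>
        if cur = s.2 + 1 then ((s.1.1, s.1.2.1, cur + 1), cur)
        else (([s.1.2.1, s.1.2.2] :: s.1.1, cur, cur + 1), cur))
      ((res, cs, prev + 1), prev)
    st.1.1.reverse ++ [[st.1.2.1, st.1.2.2]]) = spGo res.reverse cs prev t := by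
  induction t with
  | nil => intro prev cs res; simp [spGo]
  | cons y t ih =>
    intro prev cs res
    simp only [List.foldl_cons, spGo]
    by_cases h : y = prev + 1
    · rw [if_pos h, if_pos h]
      exact ih y cs res
    · rw [if_neg h, if_neg h]
      have := ih y y ([cs, prev + 1] :: res)
      simpa using this

theorem split_eq_spGo (x : Int) (t : List Int) :
    split_into_intervals (x :: t) = spGo [] x x t := by
  have := spGo_eq_fold t x x []
  simpa [split_into_intervals] using this

theorem foldl_cons_eq_rev_map {A B : Type} (f : A → B) (l : List A) (acc : List B) :
    l.foldl (fun a k => f k :: a) acc = (l.map f).reverse ++ acc := by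
  induction l generalizing acc with
  | nil => simp
  | cons x t ih => simp [ih]

theorem spGo_append (r1 r2 : List (List Int)) (cs prev : Int) (l : List Int) :
    spGo (r1 ++ r2) cs prev l = r1 ++ spGo r2 cs prev l := by
  induction l generalizing r2 cs prev with
  | nil => simp [spGo]
  | cons y t ih =>
    simp only [spGo]
    by_cases h : y = prev + 1
    · simp [h, ih]
    · simp only [if_neg h, List.append_assoc]
      exact ih (r2 ++ [[cs, prev + 1]]) y y

-- a run of consecutive values keeps extending the current interval
theorem spGo_run (n : Nat) : ∀ (prev cs : Int) (res : List (List Int)) (rest : List Int),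
    spGo res cs prev (PySem.List.pyRange (prev + 1) (prev + 1 + (n : Int)) 1 ++ rest)
      = spGo res cs (prev + (n : Int)) rest := by
  induction n with
  | zero => intro prev cs res rest; simp [PySem.List.pyRange_one_eq_nil]
  | succ m ih =>
    intro prev cs res rest
    have h : prev + 1 < prev + 1 + ((m : Int) + 1) := by omega
    rw [show ((m + 1 : Nat) : Int) = (m : Int) + 1 by push_cast; ring]
    rw [PySem.List.pyRange_one_cons h, List.cons_append]
    rw [show spGo res cs prev ((prev + 1) :: (PySem.List.pyRange (prev + 1 + 1) (prev + 1 + ((m : Int) + 1)) 1 ++ rest)) = spGo res cs (prev + 1) (PySem.List.pyRange (prev + 1 + 1) (prev + 1 + ((m : Int) + 1)) 1 ++ rest) by simp [spGo]]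
    rw [show prev + 1 + ((m : Int) + 1) = prev + 1 + 1 + (m : Int) by ring,
        show prev + ((m : Int) + 1) = prev + 1 + (m : Int) by ring]
    exact ih (prev + 1) cs res rest

theorem map_add_pyRange (a b d : Int) :
    (PySem.List.pyRange a b 1).map (fun k => k + d) = PySem.List.pyRange (a + d) (b + d) 1 := by
  rw [PySem.List.pyRange_one, PySem.List.pyRange_one, List.map_map]
  have : (b + d - (a + d)).toNat = (b - a).toNat := by omega
  rw [this]
  apply List.map_congr_left
  intro k _
  simp; ring

-- with S > 0, on the block [c*S, (c+1)*S) the transform is the shift k + (c*(stride-S) + base)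
theorem g_on_block (S bsz pad b c k : Int) (hS : 0 < S) (h1 : c * S ≤ k) (h2 : k < (c + 1) * S) :
    get_global_k k S bsz pad b = k + (c * ((S * bsz + pad) - S) + b * S) := by
  have hfd : PySem.Int.floordiv k S = c := (PySem.Int.floordiv_eq_iff_of_pos hS).mpr ⟨h1, h2⟩
  have hmod := PySem.Int.floordiv_mul_add_mod k S
  rw [hfd] at hmod
  have hm : PySem.Int.mod k S = k - c * S := by linarith
  simp only [get_global_k, hfd, hm]
  ring

theorem g_chain (S bsz pad b k : Int) (hS : 0 < S) (hstr : S * bsz + pad = S) :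
    get_global_k k S bsz pad b = k + b * S := by
  have hmod := PySem.Int.floordiv_mul_add_mod k S
  simp only [get_global_k, hstr]
  linarith

-- main block decomposition for the general case (stride ≠ seq_len)
theorem spGo_blocks (S bsz pad b e : Int) (hS : 0 < S) (hstr : S * bsz + pad ≠ S) :
    ∀ (n : Nat) (s : Int), s < e →
      (PySem.Int.floordiv (e - 1) S - PySem.Int.floordiv s S).toNat = n →
      spGo [] (get_global_k s S bsz pad b) (get_global_k s S bsz pad b)
        ((PySem.List.pyRange (s + 1) e 1).map (fun k => get_global_k k S bsz pad b))
      = (PySem.List.pyRange (PySem.Int.floordiv s S) (PySem.Int.floordiv (e - 1) S + 1) 1).map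
          (fun c => [max s (c * S) + (c * ((S * bsz + pad) - S) + b * S),
                     min e ((c + 1) * S) + (c * ((S * bsz + pad) - S) + b * S)]) := by
  intro n
  induction n using Nat.strong_induction_on with
  | _ n ih =>
    intro s hse hn
    set c0 := PySem.Int.floordiv s S with hc0
    have hsblock : c0 * S ≤ s ∧ s < (c0 + 1) * S := (PySem.Int.floordiv_eq_iff_of_pos hS).mp hc0.symm
    set d0 := c0 * ((S * bsz + pad) - S) + b * S with hd0
    have hgs : get_global_k s S bsz pad b = s + d0 := g_on_block S bsz pad b c0 s hS hsblock.1 hsblock.2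
    by_cases hend : e ≤ (c0 + 1) * S
    · -- single remaining block
      have hcl : PySem.Int.floordiv (e - 1) S = c0 :=
        (PySem.Int.floordiv_eq_iff_of_pos hS).mpr ⟨by omega, by omega⟩
      have hmap : (PySem.List.pyRange (s + 1) e 1).map (fun k => get_global_k k S bsz pad b)
          = PySem.List.pyRange (s + 1 + d0) (e + d0) 1 := by
        rw [← map_add_pyRange]
        apply List.map_congr_left
        intro k hk
        rw [PySem.List.mem_pyRange_one] at hk
        exact g_on_block S bsz pad b c0 k hS (by omega) (by omega)
      rw [hgs, hmap]
      have hrun := spGo_run (e - 1 - s).toNat (s + d0) (s + d0) [] []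
      rw [show (s + d0) + 1 = s + 1 + d0 by ring,
          show s + 1 + d0 + ((e - 1 - s).toNat : Int) = e + d0 by omega,
          List.append_nil] at hrun
      rw [hrun]
      simp only [spGo, List.nil_append]
      rw [hcl, PySem.List.pyRange_one_singleton]
      simp only [List.map_cons, List.map_nil]
      rw [max_eq_left hsblock.1, min_eq_left hend]
      rw [show s + d0 + ((e - 1 - s).toNat : Int) + 1 = e + d0 by omega, hd0]
    · -- first block ends at h0 = (c0+1)*S < e; peel it and recurse
      push_neg at hend
      set h0 := (c0 + 1) * S with hh0
      have hcl : c0 + 1 ≤ PySem.Int.floordiv (e - 1) S := by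
        have : PySem.Int.floordiv h0 S = c0 + 1 :=
          (PySem.Int.floordiv_eq_iff_of_pos hS).mpr ⟨by omega, by nlinarith⟩
        calc c0 + 1 = PySem.Int.floordiv h0 S := this.symm
          _ ≤ PySem.Int.floordiv (e - 1) S := by
              rw [PySem.Int.floordiv_eq_ediv_of_pos hS, PySem.Int.floordiv_eq_ediv_of_pos hS]
              exact Int.ediv_le_ediv hS (by omega)
      have hsplit : PySem.List.pyRange (s + 1) e 1
          = PySem.List.pyRange (s + 1) h0 1 ++ PySem.List.pyRange h0 e 1 :=
        PySem.List.pyRange_one_append _ _ _ (by omega) (by omega)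
      have hmap1 : (PySem.List.pyRange (s + 1) h0 1).map (fun k => get_global_k k S bsz pad b)
          = PySem.List.pyRange (s + 1 + d0) (h0 + d0) 1 := by
        rw [← map_add_pyRange]
        apply List.map_congr_left
        intro k hk
        rw [PySem.List.mem_pyRange_one] at hk
        exact g_on_block S bsz pad b c0 k hS (by omega) (by omega)
      rw [hgs, hsplit, List.map_append, hmap1]
      have hrun := spGo_run (h0 - 1 - s).toNat (s + d0) (s + d0) []
        ((PySem.List.pyRange h0 e 1).map (fun k => get_global_k k S bsz pad b))
      rw [show (s + d0) + 1 = s + 1 + d0 by ring,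
          show s + 1 + d0 + ((h0 - 1 - s).toNat : Int) = h0 + d0 by omega] at hrun
      rw [show s + d0 + ((h0 - 1 - s).toNat : Int) = h0 - 1 + d0 by omega] at hrun
      rw [hrun]
      -- first element of the second block breaks the run
      rw [PySem.List.pyRange_one_cons hend, List.map_cons]
      set d1 := (c0 + 1) * ((S * bsz + pad) - S) + b * S with hd1
      have hgh : get_global_k h0 S bsz pad b = h0 + d1 :=
        g_on_block S bsz pad b (c0 + 1) h0 hS (by omega) (by nlinarith)
      have hne : get_global_k h0 S bsz pad b ≠ (h0 - 1 + d0) + 1 := by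
        rw [hgh]
        intro hcontra
        have : (c0 + 1) * ((S * bsz + pad) - S) = c0 * ((S * bsz + pad) - S) := by
          rw [hd1] at hcontra; rw [hd0] at hcontra; linarith
        have hz : (S * bsz + pad) - S = 0 := by nlinarith
        exact hstr (by linarith)
      simp only [spGo, if_neg hne]
      rw [show ([] : List (List Int)) ++ [[s + d0, h0 - 1 + d0 + 1]] =
            [[s + d0, h0 - 1 + d0 + 1]] ++ [] by simp]
      rw [spGo_append]
      -- recurse on the rest starting at h0
      have hfdh : PySem.Int.floordiv h0 S = c0 + 1 :=
        (PySem.Int.floordiv_eq_iff_of_pos hS).mpr ⟨by omega, by nlinarith⟩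
      have hrec := ih (PySem.Int.floordiv (e - 1) S - (c0 + 1)).toNat (by omega) h0 hend
        (by rw [hfdh])
      rw [hfdh] at hrec
      rw [hgh] at hrec
      rw [hgh, hrec]
      -- assemble: B's list for c0 :: [c0+1 .. c_last]
      rw [PySem.List.pyRange_one_cons (by omega : c0 < PySem.Int.floordiv (e - 1) S + 1), List.map_cons]
      rw [max_eq_left hsblock.1, min_eq_right (by omega : (c0 + 1) * S ≤ e)]
      rw [show h0 - 1 + d0 + 1 = h0 + d0 by ring, hh0, hd0]
      simp only [List.singleton_append]
      congr 1
      apply List.map_congr_left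
      intro c hc
      rw [PySem.List.mem_pyRange_one] at hc
      have h1 : (c0 + 1) * S ≤ c * S := by nlinarith [hc.1]
      rw [max_eq_right h1, max_eq_right (by omega : s ≤ c * S)]

-- ===== VERDICT (by name: the statement is the Claim_ definition above) =====
theorem get_global_k_list_spec : Claim_equal_get_global_k_list := by
  intro s e S bsz pad b _hDom hPre
  have hS : 0 < S := hPre
  unfold Spec_get_global_k_list get_global_k_list get_global_k_list_alt
  rw [foldl_cons_eq_rev_map]
  simp only [List.append_nil, List.reverse_reverse]
  by_cases hse : e ≤ s
  · rw [if_pos hse, PySem.List.pyRange_one_eq_nil hse]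
    simp [split_into_intervals]
  · push_neg at hse
    rw [if_neg (by omega)]
    rw [PySem.List.pyRange_one_cons hse, List.map_cons, split_eq_spGo]
    by_cases hstr : S * bsz + pad = S
    · rw [if_pos hstr]
      have hmap : (PySem.List.pyRange (s + 1) e 1).map (fun k => get_global_k k S bsz pad b)
          = PySem.List.pyRange (s + 1 + b * S) (e + b * S) 1 := by
        rw [← map_add_pyRange]
        apply List.map_congr_left
        intro k _
        exact g_chain S bsz pad b k hS hstr
      rw [g_chain S bsz pad b s hS hstr, hmap]
      have hrun := spGo_run (e - 1 - s).toNat (s + b * S) (s + b * S) [] []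
      rw [show (s + b * S) + 1 = s + 1 + b * S by ring,
          show s + 1 + b * S + ((e - 1 - s).toNat : Int) = e + b * S by omega,
          List.append_nil] at hrun
      rw [hrun]
      simp only [spGo, List.nil_append]
      rw [show s + b * S + ((e - 1 - s).toNat : Int) + 1 = e + b * S by omega]
    · rw [if_neg hstr]
      rw [foldl_cons_eq_rev_map]
      simp only [List.append_nil, List.reverse_reverse]
      exact spGo_blocks S bsz pad b e hS hstr
        (PySem.Int.floordiv (e - 1) S - PySem.Int.floordiv s S).toNat s hse rfl
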